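-- pv_equiv track=rewrite | github.com/ntf6drtx6d-blip/AeroIntel | utils.py | is_probably_html_url
-- ===== SOURCE A (Python) =====
-- def is_probably_html_url(url: str) -> bool:
--     lowered = url.lower()
--     blocked_suffixes = [
--         ".pdf", ".jpg", ".jpeg", ".png", ".gif", ".svg",
--         ".zip", ".doc", ".docx", ".xls", ".xlsx", ".ppt", ".pptx",
--         ".mp4", ".mp3"
--     ]
--     return not any(lowered.endswith(s) for s in blocked_suffixes)
-- ===== SOURCE B (Python) =====
-- _BLOCKED = frozenset((
--     "pdf", "jpg", "jpeg", "png", "gif", "svg",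
--     "zip", "doc", "docx", "xls", "xlsx", "ppt", "pptx",
--     "mp4", "mp3",
-- ))
--
--
-- def is_probably_html_url(url: str) -> bool:
--     _head, sep, ext = url.lower().rpartition('.')
--     return not (sep and ext in _BLOCKED)
-- ===== Notes on version B (the rewrite author's own statement) =====
-- stated objective: idiomatic
-- what changed: Replaces the 15-way endswith scan with a single rpartition on the last dot and one frozenset membership test of the bare extension.
import Mathlib
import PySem

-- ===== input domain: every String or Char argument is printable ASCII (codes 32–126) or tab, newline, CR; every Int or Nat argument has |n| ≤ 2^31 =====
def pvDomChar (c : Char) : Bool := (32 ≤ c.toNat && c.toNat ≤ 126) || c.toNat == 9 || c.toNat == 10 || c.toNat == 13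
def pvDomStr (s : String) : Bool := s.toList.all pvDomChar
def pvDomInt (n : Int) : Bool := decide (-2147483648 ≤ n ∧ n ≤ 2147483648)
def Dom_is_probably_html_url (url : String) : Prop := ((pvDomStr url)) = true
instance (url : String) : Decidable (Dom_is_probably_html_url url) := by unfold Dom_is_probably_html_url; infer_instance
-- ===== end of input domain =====

-- B replaces A's 15-way endswith scan by one split at the last dot plus a set lookup of the bare extension (idiomatic; same asymptotic cost).


-- ===== PORT A =====
def is_probably_html_url (url : String) : Bool :=
  let lowered := PySem.Str.lower url
  let blocked_suffixes : List String :=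
    [".pdf", ".jpg", ".jpeg", ".png", ".gif", ".svg",
     ".zip", ".doc", ".docx", ".xls", ".xlsx", ".ppt", ".pptx",
     ".mp4", ".mp3"]
  !(blocked_suffixes.any (fun s => PySem.Str.endswith lowered s))

-- ===== PORT B =====
-- frozenset of bare extensions (all distinct, insertion order)
def pvBlocked : PySem.Set (List Char) :=
  PySem.Set.ofList
    ["pdf".toList, "jpg".toList, "jpeg".toList, "png".toList, "gif".toList, "svg".toList,
     "zip".toList, "doc".toList, "docx".toList, "xls".toList, "xlsx".toList, "ppt".toList, "pptx".toList,
     "mp4".toList, "mp3".toList]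

-- hand port of str.rpartition('.') (PySem has no rpartition): the part after the LAST dot
-- is the reversed maximal dot-free suffix; sep is nonempty iff a dot occurs. Exact on all inputs.
def is_probably_html_url_alt (url : String) : Bool :=
  let cs := (PySem.Str.lower url).toList
  let ext := (cs.reverse.takeWhile (fun c => c ≠ '.')).reverse
  let sep := cs.contains '.'
  !(sep && PySem.Set.contains pvBlocked ext)

-- ===== PRECONDITION & SPEC =====
def Spec_is_probably_html_url (url : String) (out : Bool) : Prop := out = is_probably_html_url_alt url
instance (url : String) (out : Bool) : Decidable (Spec_is_probably_html_url url out) := by unfold Spec_is_probably_html_url; infer_instance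

-- ===== CLAIM (what is proved, stated in full; the proofs are below) =====
def Claim_equal_is_probably_html_url : Prop := ∀ (url : String), Dom_is_probably_html_url url → Spec_is_probably_html_url url (is_probably_html_url url)

-- ===== LEMMAS AND PROOFS =====

-- a dot-free block d followed by '.' is a prefix of r  ↔  a dot occurs in r and d is exactly r's dot-free head
lemma prefix_dot_core (d : List Char) (hd : '.' ∉ d) :
    ∀ r : List Char, (d ++ ['.'] <+: r) ↔ ('.' ∈ r ∧ r.takeWhile (fun c => c ≠ '.') = d) := by
  induction d with
  | nil =>
    intro r
    cases r with
    | nil => simp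
    | cons c rs =>
      constructor
      · rintro ⟨t, ht⟩
        simp at ht
        obtain ⟨hc, -⟩ := ht
        subst hc
        simp [List.takeWhile]
      · rintro ⟨hmem, htw⟩
        have hc : c = '.' := by
          by_contra hne
          simp [List.takeWhile, hne] at htw
        subst hc
        exact ⟨rs, by simp⟩
  | cons a d' ih =>
    intro r
    have ha : a ≠ '.' := by simp at hd; exact fun h => hd.1 h.symm
    have hd' : '.' ∉ d' := by simp at hd; exact hd.2
    cases r with
    | nil => simp
    | cons c rs =>
      by_cases hca : c = a
      · subst hca
        have := ih hd' rs
        constructor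
        · rintro ⟨t, ht⟩
          simp at ht
          have hpre : d' ++ ['.'] <+: rs := ⟨t, by simpa using ht⟩
          obtain ⟨hmem, htw⟩ := (this).mp hpre
          refine ⟨by simp [hmem], ?_⟩
          simp [List.takeWhile, ha]
          simpa using htw
        · rintro ⟨hmem, htw⟩
          simp [List.takeWhile, ha] at htw
          have hmem' : '.' ∈ rs := by
            rcases List.mem_cons.mp hmem with h | h
            · exact absurd h.symm ha
            · exact h
          obtain ⟨t, ht⟩ := (this).mpr ⟨hmem', by simpa using htw⟩
          exact ⟨t, by simp [ht]⟩
      · constructor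
        · rintro ⟨t, ht⟩
          simp at ht
          exact absurd ht.1.symm hca
        · rintro ⟨-, htw⟩
          by_cases hcdot : c = '.'
          · simp [List.takeWhile, hcdot] at htw
          · simp [List.takeWhile, hcdot] at htw
            exact absurd htw.1 hca

-- endswith on '.'+e (e dot-free) is: a dot occurs and the last-dot extension equals e
lemma endswith_dot (e : List Char) (he : '.' ∉ e) (L : List Char) :
    PySem.Chars.endswith L ('.' :: e)
      = (L.contains '.' && decide ((L.reverse.takeWhile (fun c => c ≠ '.')).reverse = e)) := by
  have hsuf : PySem.Chars.endswith L ('.' :: e) = true ↔ ('.' :: e) <:+ L :=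
    PySem.Chars.endswith_iff L ('.' :: e)
  have hrev : ('.' :: e) <:+ L ↔ e.reverse ++ ['.'] <+: L.reverse := by
    rw [← List.reverse_prefix]
    simp
  have hcore := prefix_dot_core e.reverse (by simpa using he) L.reverse
  have htw : (L.reverse.takeWhile (fun c => c ≠ '.') = e.reverse)
      ↔ ((L.reverse.takeWhile (fun c => c ≠ '.')).reverse = e) := by
    constructor
    · intro h; rw [h]; simp
    · intro h; rw [← h]; simp
  rcases hb : PySem.Chars.endswith L ('.' :: e) with _ | _
  · symm
    simp only [Bool.and_eq_false_iff]
    by_cases hc : '.' ∈ L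
    · right
      simp only [decide_eq_false_iff_not]
      intro habs
      have : PySem.Chars.endswith L ('.' :: e) = true := by
        rw [hsuf, hrev]
        exact hcore.mpr ⟨by simpa using hc, htw.mpr habs⟩
      rw [hb] at this; exact absurd this (by simp)
    · left; simpa using hc
  · symm
    have := hcore.mp (hrev.mp (hsuf.mp hb))
    simp only [Bool.and_eq_true, decide_eq_true_iff]
    exact ⟨by simpa using this.1, htw.mp this.2⟩

-- ===== VERDICT (by name: the statement is the Claim_ definition above) =====
theorem is_probably_html_url_spec : Claim_equal_is_probably_html_url := by
  intro url _
  unfold Spec_is_probably_html_url is_probably_html_url is_probably_html_url_alt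
  simp only [List.any_cons, List.any_nil, PySem.Str.endswith_eq, PySem.Str.toList_lower]
  set L := PySem.Chars.lower url.toList with hL
  rw [show (".pdf" : String).toList = '.' :: "pdf".toList from rfl,
      endswith_dot "pdf".toList (by decide) L]
  rw [show (".jpg" : String).toList = '.' :: "jpg".toList from rfl,
      endswith_dot "jpg".toList (by decide) L]
  rw [show (".jpeg" : String).toList = '.' :: "jpeg".toList from rfl,
      endswith_dot "jpeg".toList (by decide) L]
  rw [show (".png" : String).toList = '.' :: "png".toList from rfl,
      endswith_dot "png".toList (by decide) L]
  rw [show (".gif" : String).toList = '.' :: "gif".toList from rfl,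
      endswith_dot "gif".toList (by decide) L]
  rw [show (".svg" : String).toList = '.' :: "svg".toList from rfl,
      endswith_dot "svg".toList (by decide) L]
  rw [show (".zip" : String).toList = '.' :: "zip".toList from rfl,
      endswith_dot "zip".toList (by decide) L]
  rw [show (".doc" : String).toList = '.' :: "doc".toList from rfl,
      endswith_dot "doc".toList (by decide) L]
  rw [show (".docx" : String).toList = '.' :: "docx".toList from rfl,
      endswith_dot "docx".toList (by decide) L]
  rw [show (".xls" : String).toList = '.' :: "xls".toList from rfl,
      endswith_dot "xls".toList (by decide) L]
  rw [show (".xlsx" : String).toList = '.' :: "xlsx".toList from rfl,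
      endswith_dot "xlsx".toList (by decide) L]
  rw [show (".ppt" : String).toList = '.' :: "ppt".toList from rfl,
      endswith_dot "ppt".toList (by decide) L]
  rw [show (".pptx" : String).toList = '.' :: "pptx".toList from rfl,
      endswith_dot "pptx".toList (by decide) L]
  rw [show (".mp4" : String).toList = '.' :: "mp4".toList from rfl,
      endswith_dot "mp4".toList (by decide) L]
  rw [show (".mp3" : String).toList = '.' :: "mp3".toList from rfl,
      endswith_dot "mp3".toList (by decide) L]
  rw [show pvBlocked = ["pdf".toList, "jpg".toList, "jpeg".toList, "png".toList, "gif".toList,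
      "svg".toList, "zip".toList, "doc".toList, "docx".toList, "xls".toList, "xlsx".toList,
      "ppt".toList, "pptx".toList, "mp4".toList, "mp3".toList] from by decide]
  simp [PySem.Set.contains_eq_listContains, List.contains_eq_mem, Bool.and_or_distrib_left]
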